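-- pv_equiv track=rewrite | github.com/pokhym/mdr | utils.py | extract_chapter_num_string
-- ===== SOURCE A (Python) =====
-- def is_char_digit(c):
--   return c in ["0", "1", "2", "3", "4", "5", "6", "7", "8", "9"]
--
-- def is_char_period(c):
--   return c == "."
--
-- def extract_chapter_num_string(chapter_title):
--   """
--   Ch. 227 - Tried Various Things (3) -> 227
--
--   Returns
--   ------------
--   ch_num: str
--     String representation of the chapter number
--   """
--   found_first_digit = False
--   num_string = ""
--   for c in chapter_title:
--     # First character must be a number
--     if is_char_digit(c) and found_first_digit == False:
--       found_first_digit = True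
--       num_string += c
--       continue
--     elif found_first_digit == False:
--       continue
--     # Any subsequent char must be a digit or period
--     if found_first_digit and (is_char_digit(c) or is_char_period(c)):
--       num_string += c
--     # Terminate if no more digits or periods are found
--     else:
--       break
--
--   if num_string == "":
--     raise Exception("Unable to find chapter number for '" + chapter_title + "'")
--
--   return num_string
-- ===== SOURCE B (Python) =====
-- def extract_chapter_num_string(chapter_title):
--   # Two-phase: locate the first digit, then slice the digit/period run.
--   for i, c in enumerate(chapter_title):
--     if c.isdigit():
--       rest = chapter_title[i:]
--       j = 0
--       while j < len(rest) and (rest[j].isdigit() or rest[j] == "."):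
--         j += 1
--       return rest[:j]
--   raise Exception("Unable to find chapter number for '" + chapter_title + "'")
-- ===== Notes on version B (the rewrite author's own statement) =====
-- stated objective: alternative
-- what changed: Replaces A's single flag-driven state machine (found_first_digit with continue/break) by a two-phase locate-then-consume structure: find the index of the first digit, then take the digit-or-period run from the slice at that index; same exception and message when no digit exists.
import Mathlib
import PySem

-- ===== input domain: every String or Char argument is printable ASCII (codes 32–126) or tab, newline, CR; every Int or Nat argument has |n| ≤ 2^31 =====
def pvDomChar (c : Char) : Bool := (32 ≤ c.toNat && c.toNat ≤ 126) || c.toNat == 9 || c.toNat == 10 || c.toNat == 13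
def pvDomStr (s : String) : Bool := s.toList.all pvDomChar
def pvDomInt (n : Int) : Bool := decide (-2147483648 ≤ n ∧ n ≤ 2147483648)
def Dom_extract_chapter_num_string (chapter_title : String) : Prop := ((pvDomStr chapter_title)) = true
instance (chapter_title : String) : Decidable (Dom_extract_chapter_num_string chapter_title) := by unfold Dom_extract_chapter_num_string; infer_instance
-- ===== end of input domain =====

-- B replaces A's flag-driven state machine (found_first_digit + continue/break) by a
-- two-phase locate-then-consume decomposition (find first digit, then take the digit/period run);
-- same O(n) cost, different structure.

-- ===== PORT A =====
-- Python: c in ["0",...,"9"] over one-character strings; exact as Char membership.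
def pvIsCharDigit (c : Char) : Bool := ['0','1','2','3','4','5','6','7','8','9'].contains c
def pvIsCharPeriod (c : Char) : Bool := c == '.'

-- the for-loop of A: state = (found_first_digit, num_string); returning num models `break`.
def pvALoop : Bool → List Char → List Char → List Char
  | _, num, [] => num
  | found, num, c :: cs =>
    if pvIsCharDigit c && !found then pvALoop true (num ++ [c]) cs
    else if !found then pvALoop found num cs
    else if found && (pvIsCharDigit c || pvIsCharPeriod c) then pvALoop found (num ++ [c]) cs
    else num

def extract_chapter_num_string (chapter_title : String) : String :=
  -- when the loop result is "" Python raises Exception; those inputs are excluded by Pre_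
  String.ofList (pvALoop false [] chapter_title.toList)

-- ===== PORT B =====
-- phase 1 of Source B: scan for the first digit, keep the tail from there (`chapter_title[i:]`)
def pvBFindDigit : List Char → Option (List Char)
  | [] => none
  | c :: cs => if PySem.Chars.isdigit c then some (c :: cs) else pvBFindDigit cs

-- phase 2 of Source B: the while-loop counting the digit/period run length j
def pvBRun : List Char → Nat
  | [] => 0
  | c :: cs => if PySem.Chars.isdigit c || c == '.' then pvBRun cs + 1 else 0

def extract_chapter_num_string_alt (chapter_title : String) : String :=
  match pvBFindDigit chapter_title.toList with
  | some rest => String.ofList (rest.take (pvBRun rest))   -- rest[:j]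
  | none => ""   -- Python raises Exception here; excluded by Pre_

-- ===== PRECONDITION & SPEC =====
-- Pre_ excludes exactly the titles with no digit, on which Python A (and B) raises Exception.
def Pre_extract_chapter_num_string (chapter_title : String) : Prop :=
  chapter_title.toList.any pvIsCharDigit = true
instance (chapter_title : String) : Decidable (Pre_extract_chapter_num_string chapter_title) := by
  unfold Pre_extract_chapter_num_string; infer_instance

def pvWitness_extract_chapter_num_string : String := "Ch. 227 - Tried Various Things (3)"

def Spec_extract_chapter_num_string (chapter_title : String) (out : String) : Prop := out = extract_chapter_num_string_alt chapter_title
instance (chapter_title : String) (out : String) : Decidable (Spec_extract_chapter_num_string chapter_title out) := by unfold Spec_extract_chapter_num_string; infer_instance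

-- ===== CLAIM (what is proved, stated in full; the proofs are below) =====
def Claim_equal_extract_chapter_num_string : Prop := ∀ (chapter_title : String), Dom_extract_chapter_num_string chapter_title → Pre_extract_chapter_num_string chapter_title → Spec_extract_chapter_num_string chapter_title (extract_chapter_num_string chapter_title)

-- ===== LEMMAS AND PROOFS =====

-- A's digit test (list membership) agrees with Python's c.isdigit() as ported for B
theorem pvIsCharDigit_eq (c : Char) : pvIsCharDigit c = PySem.Chars.isdigit c := by
  rw [Bool.eq_iff_iff]
  simp only [pvIsCharDigit, List.contains_eq_mem, List.mem_cons, List.not_mem_nil, or_false,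
    decide_eq_true_eq, PySem.Chars.isdigit, Bool.and_eq_true, decide_eq_true_eq,
    Char.le_def, Char.ext_iff, UInt32.le_iff_toNat_le, ← UInt32.toNat_inj,
    show ('0':Char).val.toNat = 48 from rfl, show ('1':Char).val.toNat = 49 from rfl,
    show ('2':Char).val.toNat = 50 from rfl, show ('3':Char).val.toNat = 51 from rfl,
    show ('4':Char).val.toNat = 52 from rfl, show ('5':Char).val.toNat = 53 from rfl,
    show ('6':Char).val.toNat = 54 from rfl, show ('7':Char).val.toNat = 55 from rfl,
    show ('8':Char).val.toNat = 56 from rfl, show ('9':Char).val.toNat = 57 from rfl]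
  omega

-- once the first digit is found, A's loop appends exactly the digit/period run
theorem pvALoop_found (cs : List Char) : ∀ num, pvALoop true num cs = num ++ cs.take (pvBRun cs) := by
  induction cs with
  | nil => intro num; simp [pvALoop, pvBRun]
  | cons c cs ih =>
    intro num
    by_cases h : (PySem.Chars.isdigit c || c == '.') = true
    · simp [pvALoop, pvBRun, pvIsCharPeriod, pvIsCharDigit_eq, h, ih, List.take_succ_cons]
    · simp [pvALoop, pvBRun, pvIsCharPeriod, pvIsCharDigit_eq, h]

-- A's whole loop from the initial state equals B's locate-then-take decomposition
theorem pvALoop_eq_B (cs : List Char) :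
    pvALoop false [] cs =
      (match pvBFindDigit cs with
       | some rest => rest.take (pvBRun rest)
       | none => []) := by
  induction cs with
  | nil => simp [pvALoop, pvBFindDigit]
  | cons c cs ih =>
    by_cases h : PySem.Chars.isdigit c = true
    · simp [pvALoop, pvBFindDigit, pvBRun, pvIsCharDigit_eq, h, pvALoop_found,
        List.take_succ_cons]
    · simp [pvALoop, pvBFindDigit, pvIsCharDigit_eq, h, ih]

-- ===== VERDICT (by name: the statement is the Claim_ definition above) =====
theorem extract_chapter_num_string_spec : Claim_equal_extract_chapter_num_string := by
  intro t _ _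
  unfold Spec_extract_chapter_num_string extract_chapter_num_string extract_chapter_num_string_alt
  rw [pvALoop_eq_B]
  cases pvBFindDigit t.toList <;> rfl
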